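-- pv_equiv track=rewrite | github.com/door2u/Python | Math/node.py | Entr
-- ===== SOURCE A (Python) =====
-- def Entr(entr, inde = 0):
-- 	retu = ""
-- 	a = 0
-- 	while a < len(entr):
-- 		if entr[a] == "@":
-- 			a += 1
-- 			while a < len(entr) and entr[a].isnumeric():
-- 				retu += entr[a]
-- 				a += 1
-- 			break
-- 		a += 1
-- 	if retu == "":
-- 		retu = "-1"
-- 	return int(retu)
-- ===== SOURCE B (Python) =====
-- def Entr(entr, inde=0):
--     _, sep, rest = entr.partition('@')
--     if not sep:
--         return -1
--     n = next((i for i, c in enumerate(rest) if not c.isnumeric()), len(rest))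
--     return int(rest[:n]) if n else -1
-- ===== Notes on version B (the rewrite author's own statement) =====
-- stated objective: simpler
-- what changed: Replaces A's index-driven outer/inner while loops and character-by-character accumulator with a direct decomposition: partition the string at the first at-sign, find the end of the leading numeric run with a generator over enumerate, and slice it out.
import Mathlib
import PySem

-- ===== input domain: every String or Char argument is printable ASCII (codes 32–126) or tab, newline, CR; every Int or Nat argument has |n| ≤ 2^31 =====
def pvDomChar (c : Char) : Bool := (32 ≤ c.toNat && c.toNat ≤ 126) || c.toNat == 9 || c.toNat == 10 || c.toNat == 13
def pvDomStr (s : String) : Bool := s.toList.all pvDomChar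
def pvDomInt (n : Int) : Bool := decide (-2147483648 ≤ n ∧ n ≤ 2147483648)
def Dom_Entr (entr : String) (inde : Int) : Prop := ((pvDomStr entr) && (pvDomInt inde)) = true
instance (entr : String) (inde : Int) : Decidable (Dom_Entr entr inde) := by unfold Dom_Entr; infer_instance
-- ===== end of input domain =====

-- B replaces A's index-driven double while-loop by partition-at-the-at-sign / take-leading-digit-run / slice; objective: simpler.
-- Python's str.isnumeric is ported as PySem.Chars.isdigit — exact on the ASCII input domain, where isnumeric = isdigit.

-- ===== PORT A =====
-- inner while loop: collects numeric chars into retu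
def EntrCollect : List Char → List Char → List Char
  | [], retu => retu
  | c :: t, retu => if PySem.Chars.isdigit c then EntrCollect t (retu ++ [c]) else retu

-- outer while loop: scans for '@', then runs the inner loop and breaks
def EntrScan : List Char → List Char
  | [] => []
  | c :: t => if c = '@' then EntrCollect t [] else EntrScan t

def Entr (entr : String) (inde : Int) : Int :=
  let retu := EntrScan entr.toList
  let retu := if retu = [] then ['-', '1'] else retu
  -- int(retu): on the strings this program builds ofChars? is always some; getD 0 is unreachable
  (PySem.Int.ofChars? retu).getD 0

-- ===== PORT B =====
-- entr.partition('@'): some rest = the part after the first '@' (sep nonempty), none = no '@'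
def pyPartitionAt : List Char → Option (List Char)
  | [] => none
  | c :: t => if c = '@' then some t else pyPartitionAt t

def Entr_alt (entr : String) (inde : Int) : Int :=
  match pyPartitionAt entr.toList with
  | none => -1
  | some rest =>
    -- next((i for i, c in enumerate(rest) if not c.isnumeric()), len(rest)) = findIdx (default = length)
    let n := rest.findIdx (fun c => !PySem.Chars.isdigit c)
    if n = 0 then -1 else (PySem.Int.ofChars? (rest.take n)).getD 0

-- ===== PRECONDITION & SPEC =====
def Spec_Entr (entr : String) (inde : Int) (out : Int) : Prop := out = Entr_alt entr inde
instance (entr : String) (inde : Int) (out : Int) : Decidable (Spec_Entr entr inde out) := by unfold Spec_Entr; infer_instance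

-- ===== CLAIM (what is proved, stated in full; the proofs are below) =====
def Claim_equal_Entr : Prop := ∀ (entr : String) (inde : Int), Dom_Entr entr inde → Spec_Entr entr inde (Entr entr inde)

-- ===== LEMMAS AND PROOFS =====

theorem entrCollect_eq (t : List Char) (acc : List Char) :
    EntrCollect t acc = acc ++ t.takeWhile PySem.Chars.isdigit := by
  induction t generalizing acc with
  | nil => simp [EntrCollect]
  | cons c t ih =>
    simp only [EntrCollect, List.takeWhile]
    cases h : PySem.Chars.isdigit c <;> simp [h, ih]

theorem entrScan_eq (cs : List Char) :
    EntrScan cs = (pyPartitionAt cs).elim [] (·.takeWhile PySem.Chars.isdigit) := by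
  induction cs with
  | nil => simp [EntrScan, pyPartitionAt]
  | cons c t ih =>
    simp only [EntrScan, pyPartitionAt]
    split
    · simp [entrCollect_eq]
    · exact ih

theorem take_findIdx_not (p : Char → Bool) (l : List Char) :
    l.take (l.findIdx fun c => !p c) = l.takeWhile p := by
  induction l with
  | nil => rfl
  | cons c t ih =>
    simp only [List.findIdx_cons, List.takeWhile]
    cases h : p c <;> simp [h, ih]

theorem findIdx_zero_iff (p : Char → Bool) (l : List Char) :
    (l.findIdx fun c => !p c) = 0 ↔ l.takeWhile p = [] := by
  cases l with
  | nil => simp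
  | cons c t =>
    simp only [List.findIdx_cons, List.takeWhile]
    cases h : p c <;> simp [h]

-- ===== VERDICT (by name: the statement is the Claim_ definition above) =====
theorem Entr_spec : Claim_equal_Entr := by
  intro entr inde _
  unfold Spec_Entr Entr Entr_alt
  rw [entrScan_eq]
  cases h : pyPartitionAt entr.toList with
  | none => decide
  | some rest =>
    simp only [Option.elim]
    rw [take_findIdx_not]
    by_cases hz : (rest.findIdx fun c => !PySem.Chars.isdigit c) = 0
    · rw [(findIdx_zero_iff _ _).mp hz]
      simp [hz]
      decide
    · have hne : rest.takeWhile PySem.Chars.isdigit ≠ [] :=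
        fun he => hz ((findIdx_zero_iff _ _).mpr he)
      simp [hz, hne]
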